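-- pv_equiv track=rewrite | github.com/icodesrinivas/myPractise | DSA_Problems/GreedyAlgo/chooseAndSwap.py | chooseAndSwap
-- ===== SOURCE A (Python) =====
-- def chooseAndSwap(A):
--
--     s = sorted(set(A))
--     swap_a = None
--     swap_b = None
--     for item in A:
--         if ord(item) > ord(s[0]):
--             swap_a = item
--             swap_b = s[0]
--             break
--         elif ord(item) == ord(s[0]): s.pop(0)
--         if len(s) == 0: return A
--
--     A = list(A)
--     for index in range(len(A)):
--         if A[index] == swap_a: A[index] = swap_b
--         elif A[index] == swap_b: A[index] = swap_a
--
--     return "".join(A)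
-- ===== SOURCE B (Python) =====
-- def chooseAndSwap(A):
--     # Brute force: try every unordered pair of distinct characters, swap all
--     # occurrences, and return the lexicographically smallest result (including
--     # the unswapped original).
--     d = sorted(set(A))
--     best = A
--     for i in range(len(d)):
--         for j in range(i + 1, len(d)):
--             x, y = d[i], d[j]
--             cand = "".join(y if c == x else x if c == y else c for c in A)
--             if cand < best:
--                 best = cand
--     return best
-- ===== Notes on version B (the rewrite author's own statement) =====
-- stated objective: alternative
-- what changed: Replaces the greedy left-to-right scan with pop/skip/break bookkeeping by exhaustive enumeration: B builds every candidate string obtained by swapping one unordered pair of distinct characters (plus the original) and returns the lexicographic minimum.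
import Mathlib
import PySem

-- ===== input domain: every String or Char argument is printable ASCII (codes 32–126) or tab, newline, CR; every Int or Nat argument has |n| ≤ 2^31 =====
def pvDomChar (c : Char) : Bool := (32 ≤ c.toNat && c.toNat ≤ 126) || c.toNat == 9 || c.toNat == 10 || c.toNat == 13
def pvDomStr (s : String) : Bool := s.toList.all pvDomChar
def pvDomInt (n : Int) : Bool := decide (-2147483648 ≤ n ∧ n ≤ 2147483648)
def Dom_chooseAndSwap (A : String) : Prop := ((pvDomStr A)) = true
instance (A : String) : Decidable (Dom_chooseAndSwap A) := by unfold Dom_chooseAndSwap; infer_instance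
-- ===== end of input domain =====

-- B replaces A's greedy scan by brute force over all single character-pair swaps,
-- returning the lexicographically smallest result (objective: alternative algorithm).

-- ===== PORT A =====

-- sorted(set(A)) — shared by both ports (both Pythons compute it the same way)
def pvSortedDistinct (A : String) : List Char :=
  PySem.List.sorted (PySem.Set.ofList A.toList) (fun c => c)

-- the character substitution both Pythons apply position-wise:
-- c == x -> y, c == y -> x, otherwise c
def pvSwapC (x y c : Char) : Char := if c = x then y else if c = y then x else c

-- A's first loop: scan items against the mutable sorted list s;
-- `some (swap_a, swap_b)` = the break, `none` = any path that returns A unchanged.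
def pvScan : List Char → List Char → Option (Char × Char)
  | [], _ => none
  | it :: rest, s =>
    match s with
    | [] => none  -- Python's s[0] would raise IndexError here; unreachable from chooseAndSwap
                  -- (s is empty only when A is empty, and the loop guards len(s)==0 before recursing)
    | s0 :: st =>
      if s0 < it then some (it, s0)                      -- ord(item) > ord(s[0]): break with the pair
      else
        let s' := if it = s0 then st else s0 :: st       -- elif equal: s.pop(0)
        if s'.length = 0 then none else pvScan rest s'   -- if len(s) == 0: return A

def chooseAndSwap (A : String) : String :=
  match pvScan A.toList (pvSortedDistinct A) with
  | none => A                                            -- swap_a is None: the second loop changes nothing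
  | some (a, b) => String.ofList (A.toList.map (pvSwapC a b))  -- the second loop + "".join

-- ===== PORT B =====

-- all pairs (d[i], d[j]) with i < j, in B's loop order
def pvPairs : List Char → List (Char × Char)
  | [] => []
  | x :: t => t.map (fun y => (x, y)) ++ pvPairs t

def chooseAndSwap_alt (A : String) : String :=
  (pvPairs (pvSortedDistinct A)).foldl
    (fun best p =>
      let cand := String.ofList (A.toList.map (pvSwapC p.1 p.2))
      if cand < best then cand else best) A

-- ===== PRECONDITION & SPEC =====
def Spec_chooseAndSwap (A : String) (out : String) : Prop := out = chooseAndSwap_alt A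
instance (A : String) (out : String) : Decidable (Spec_chooseAndSwap A out) := by unfold Spec_chooseAndSwap; infer_instance

-- ===== CLAIM (what is proved, stated in full; the proofs are below) =====
def Claim_equal_chooseAndSwap : Prop := ∀ (A : String), Dom_chooseAndSwap A → Spec_chooseAndSwap A (chooseAndSwap A)

-- ===== LEMMAS AND PROOFS =====

-- "PrefStar P l": for every split of the scanned prefix P at an element q, every character
-- of l smaller than q already occurs earlier in P (the invariant A's scan maintains).
def PrefStar (P l : List Char) : Prop :=
  ∀ P1 q P2, P = P1 ++ q :: P2 → ∀ c ∈ l, c < q → c ∈ P1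

theorem prefStar_nil (l : List Char) : PrefStar [] l := by
  intro P1 q P2 h
  exact absurd h (by simp)

theorem prefStar_snoc (l P : List Char) (q : Char) (hP : PrefStar P l)
    (hq : ∀ c ∈ l, c < q → c ∈ P) : PrefStar (P ++ [q]) l := by
  intro P1 q' P2 hsplit c hc hlt
  rcases List.append_eq_append_iff.mp hsplit with ⟨as, h1, h2⟩ | ⟨bs, h1, h2⟩
  · -- P1 = P ++ as and [q] = as ++ q' :: P2 : as = [], q' = q, P1 ⊇ P
    cases as with
    | nil =>
      simp at h1 h2
      exact h1 ▸ hq c hc (h2.1 ▸ hlt)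
    | cons a as' =>
      have := congrArg List.length h2
      simp at this
  · -- P = P1 ++ bs and q' :: P2 = bs ++ [q]
    cases bs with
    | nil =>
      simp at h2 h1
      exact h1 ▸ hq c hc (h2.1 ▸ hlt)
    | cons b1 bs' =>
      have he : q' = b1 := by simpa using congrArg (fun t => t.head?) h2
      subst he
      exact hP P1 q' bs' h1 c hc hlt

theorem prefStar_seen (l P E : List Char) (hl : l = P ++ E) (hP : PrefStar P l)
    (hall : ∀ c ∈ l, c ∈ P) : PrefStar l l := by
  intro P1 q P2 hsplit c hc hlt
  rw [hl] at hsplit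
  rcases List.append_eq_append_iff.mp hsplit with ⟨as, h1, h2⟩ | ⟨bs, h1, h2⟩
  · -- P1 = P ++ as : c ∈ P ⊆ P1
    exact h1 ▸ List.mem_append_left as (hall c hc)
  · -- P = P1 ++ bs
    cases bs with
    | nil =>
      simp at h1
      exact h1 ▸ hall c hc
    | cons b1 bs' =>
      have he : q = b1 := by simpa using congrArg (fun t => t.head?) h2
      subst he
      exact hP P1 q bs' h1 c hc hlt

theorem seen_lt_unseen (l P : List Char) (p c : Char) (hP : PrefStar P l)
    (hp : p ∈ P) (hc : c ∈ l) (hcP : c ∉ P) : p < c := by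
  obtain ⟨P1, P2, hsplit⟩ := List.append_of_mem hp
  rcases lt_trichotomy p c with h | h | h
  · exact h
  · exact absurd (h ▸ hp) hcP
  · exact absurd (hsplit ▸ List.mem_append_left _ (hP P1 p P2 hsplit c hc h)) hcP

theorem scan_spec (l : List Char) : ∀ (items P s : List Char),
    l = P ++ items →
    (∀ c : Char, c ∈ s ↔ (c ∈ l ∧ c ∉ P)) →
    s.Pairwise (· < ·) →
    PrefStar P l →
    (pvScan items s = none → PrefStar l l) ∧
    (∀ a b, pvScan items s = some (a, b) →
      ∃ P' R, l = P' ++ a :: R ∧ b ∈ l ∧ b < a ∧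
        (∀ p ∈ P', p < b) ∧ (∀ c ∈ l, c < b → c ∈ P') ∧ PrefStar P' l) := by
  intro items
  induction items with
  | nil =>
    intro P s hl hs hpair hP
    simp at hl
    subst hl
    exact ⟨fun _ => hP, fun a b hab => by simp [pvScan] at hab⟩
  | cons it rest ih =>
    intro P s hl hs hpair hP
    cases s with
    | nil =>
      have hall : ∀ c ∈ l, c ∈ P := by
        intro c hc
        by_contra hcP
        exact absurd ((hs c).mpr ⟨hc, hcP⟩) (by simp)
      exact ⟨fun _ => prefStar_seen l P (it :: rest) hl hP hall,
        fun a b hab => by simp [pvScan] at hab⟩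
    | cons s0 st =>
      have hs0l : s0 ∈ l := ((hs s0).mp (by simp)).1
      have hs0P : s0 ∉ P := ((hs s0).mp (by simp)).2
      have hmin : ∀ c ∈ l, c < s0 → c ∈ P := by
        intro c hc hlt
        by_contra hcP
        rcases List.mem_cons.mp ((hs c).mpr ⟨hc, hcP⟩) with h | h
        · exact absurd (h ▸ hlt) (lt_irrefl s0)
        · exact absurd hlt (not_lt.mpr (le_of_lt ((List.pairwise_cons.mp hpair).1 c h)))
      by_cases h1 : s0 < it
      · -- break: the pair is (it, s0)
        constructor
        · intro hn
          rw [pvScan] at hn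
          simp [h1] at hn
        · intro a b hab
          rw [pvScan] at hab
          simp [h1] at hab
          obtain ⟨ha, hb⟩ := hab
          subst ha; subst hb
          exact ⟨P, rest, hl, hs0l, h1, fun p hp => seen_lt_unseen l P p s0 hP hp hs0l hs0P,
            hmin, hP⟩
      · have hP' : ∀ q, (∀ c ∈ l, c < q → c ∈ P) → PrefStar (P ++ [q]) l :=
          fun q h => prefStar_snoc l P q hP h
        by_cases h2 : it = s0
        · -- pop branch
          subst h2
          have hPs : PrefStar (P ++ [it]) l := hP' it hmin
          have hl' : l = (P ++ [it]) ++ rest := by simpa using hl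
          have hs' : ∀ c : Char, c ∈ st ↔ (c ∈ l ∧ c ∉ P ++ [it]) := by
            intro c
            constructor
            · intro hcst
              have hcs := (hs c).mp (List.mem_cons_of_mem _ hcst)
              have hgt : it < c := (List.pairwise_cons.mp hpair).1 c hcst
              simp [hcs.1, hcs.2, ne_of_gt hgt]
            · rintro ⟨hcl, hcP⟩
              simp at hcP
              rcases List.mem_cons.mp ((hs c).mpr ⟨hcl, hcP.1⟩) with h | h
              · exact absurd h hcP.2
              · exact h
          by_cases h3 : st.length = 0
          · -- len(s) == 0: return A
            have hst : st = [] := List.length_eq_zero_iff.mp h3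
            subst hst
            have hall : ∀ c ∈ l, c ∈ P ++ [it] := by
              intro c hc
              by_contra hcP
              exact absurd ((hs' c).mpr ⟨hc, hcP⟩) (by simp)
            constructor
            · intro _
              exact prefStar_seen l (P ++ [it]) rest hl' hPs hall
            · intro a b hab
              rw [pvScan] at hab
              simp at hab
          · have hstep : pvScan (it :: rest) (it :: st) = pvScan rest st := by
              rw [pvScan]
              simp [h3]
            rw [hstep]
            exact ih (P ++ [it]) st hl' hs' (List.pairwise_cons.mp hpair).2 hPs
        · -- skip branch: it < s0, it was seen before
          have hlt : it < s0 := lt_of_le_of_ne (not_lt.mp h1) h2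
          have hminit : ∀ c ∈ l, c < it → c ∈ P := by
            intro c hc hcl
            by_contra hcP
            rcases List.mem_cons.mp ((hs c).mpr ⟨hc, hcP⟩) with h | h
            · rw [h] at hcl
              exact absurd hcl (not_lt.mpr (le_of_lt hlt))
            · exact absurd hcl
                (not_lt.mpr (le_of_lt (lt_trans hlt ((List.pairwise_cons.mp hpair).1 c h))))
          have hPs : PrefStar (P ++ [it]) l := hP' it hminit
          have hl' : l = (P ++ [it]) ++ rest := by simpa using hl
          have hs' : ∀ c : Char, c ∈ s0 :: st ↔ (c ∈ l ∧ c ∉ P ++ [it]) := by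
            intro c
            constructor
            · intro hcs0
              have hcs := (hs c).mp hcs0
              have hne : c ≠ it := by
                rcases List.mem_cons.mp hcs0 with h | h
                · rw [h]
                  exact ne_of_gt hlt
                · exact ne_of_gt (lt_trans hlt ((List.pairwise_cons.mp hpair).1 c h))
              simp [hcs.1, hcs.2, hne]
            · rintro ⟨hcl, hcP⟩
              simp at hcP
              exact (hs c).mpr ⟨hcl, hcP.1⟩
          have hstep : pvScan (it :: rest) (s0 :: st) = pvScan rest (s0 :: st) := by
            rw [pvScan]
            simp [h1, h2]
          rw [hstep]
          exact ih (P ++ [it]) (s0 :: st) hl' hs' hpair hPs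

-- map (pvSwapC x y) is the identity on a list avoiding x and y
theorem map_clean (x y : Char) (U : List Char) (h : ∀ u ∈ U, u ≠ x ∧ u ≠ y) :
    U.map (pvSwapC x y) = U := by
  induction U with
  | nil => rfl
  | cons u t ih =>
    have hu := h u (by simp)
    simp [pvSwapC, hu.1, hu.2, ih (fun v hv => h v (by simp [hv]))]

theorem swapC_comm (x y c : Char) : pvSwapC x y c = pvSwapC y x c := by
  unfold pvSwapC
  split_ifs <;> simp_all

theorem lex_prefix (P : List Char) (c1 c2 : Char) (t1 t2 : List Char) (h : c1 < c2) :
    P ++ c1 :: t1 < P ++ c2 :: t2 := by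
  induction P with
  | nil => exact List.cons_lt_cons_iff.mpr (Or.inl h)
  | cons p P ih => exact List.cons_lt_cons_iff.mpr (Or.inr ⟨rfl, ih⟩)

theorem ofList_lt_ofList {l m : List Char} (h : l < m) :
    String.ofList l < String.ofList m := by
  rw [String.lt_iff_toList_lt]; simpa using h

-- first occurrence of either of two characters
theorem first_occ (x y : Char) (l : List Char) (hx : x ∈ l) :
    ∃ U e V, l = U ++ e :: V ∧ (e = x ∨ e = y) ∧ ∀ u ∈ U, u ≠ x ∧ u ≠ y := by
  induction l with
  | nil => simp at hx
  | cons c t ih =>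
    by_cases hc : c = x ∨ c = y
    · exact ⟨[], c, t, by simp, hc, by simp⟩
    · push Not at hc
      have hxt : x ∈ t := by
        rcases List.mem_cons.mp hx with h | h
        · exact absurd h.symm hc.1
        · exact h
      obtain ⟨U, e, V, h1, h2, h3⟩ := ih hxt
      exact ⟨c :: U, e, V, by simp [h1], h2,
        fun u hu => by
          rcases List.mem_cons.mp hu with h | h
          · exact h ▸ hc
          · exact h3 u h⟩

-- no-break case: the original string is strictly below every swapped candidate
theorem cand_gt_none (l : List Char) (hstar : PrefStar l l) (x y : Char)
    (hx : x ∈ l) (hxy : x < y) : l < l.map (pvSwapC x y) := by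
  obtain ⟨U, e, V, hUeV, he, hclean⟩ := first_occ x y l hx
  have hex : e = x := by
    rcases he with h | h
    · exact h
    · rw [h] at hUeV
      exact absurd rfl (hclean x (hstar U y V hUeV x hx hxy)).1
  rw [hex] at hUeV
  have hmap : l.map (pvSwapC x y) = U ++ y :: (V.map (pvSwapC x y)) := by
    rw [hUeV, List.map_append, List.map_cons, map_clean x y U hclean]
    simp [pvSwapC]
  rw [hmap, hUeV]
  exact lex_prefix U x y V _ hxy

-- the greedy swap leaves the scanned prefix unchanged and puts b at the break position
theorem greedy_map (l P : List Char) (a b : Char) (R : List Char)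
    (hl : l = P ++ a :: R) (hPb : ∀ p ∈ P, p < b) (hba : b < a) :
    l.map (pvSwapC b a) = P ++ b :: (R.map (pvSwapC b a)) := by
  have hclean : ∀ u ∈ P, u ≠ b ∧ u ≠ a :=
    fun u hu => ⟨ne_of_lt (hPb u hu), ne_of_lt (lt_trans (hPb u hu) hba)⟩
  rw [hl, List.map_append, List.map_cons, map_clean b a P hclean]
  simp [pvSwapC, ne_of_gt hba]

-- break case: the greedy swap (b, a) is strictly below the original …
theorem cand_lt_orig (l P : List Char) (a b : Char) (R : List Char)
    (hl : l = P ++ a :: R) (hPb : ∀ p ∈ P, p < b) (hba : b < a) :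
    l.map (pvSwapC b a) < l := by
  rw [greedy_map l P a b R hl hPb hba, hl]
  exact lex_prefix P b a _ R hba

-- … and strictly below every other swapped candidate
theorem cand_lt_cand (l P : List Char) (a b : Char) (R : List Char)
    (hl : l = P ++ a :: R) (hPb : ∀ p ∈ P, p < b)
    (hbmin : ∀ c ∈ l, c < b → c ∈ P) (hstar : PrefStar P l) (hba : b < a)
    (x y : Char) (hx : x ∈ l) (_hy : y ∈ l) (hxy : x < y)
    (hne : ¬(x = b ∧ y = a)) :
    l.map (pvSwapC b a) < l.map (pvSwapC x y) := by
  by_cases hxP : x ∈ P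
  · -- x was scanned: the first {x,y}-occurrence is an x inside P, where the
    -- greedy map is the identity and the candidate writes the larger y
    have hxb : x < b := hPb x hxP
    obtain ⟨U, e, V, hUeV, he, hclean⟩ := first_occ x y l hx
    have happ : P ++ (a :: R) = U ++ (e :: V) := by rw [← hl, ← hUeV]
    rcases List.append_eq_append_iff.mp happ with ⟨as, hU, _⟩ | ⟨bs, hPU, hEV⟩
    · exact absurd rfl (hclean x (hU ▸ List.mem_append_left _ hxP)).1
    · cases bs with
      | nil =>
        simp at hPU
        exact absurd rfl (hclean x (hPU ▸ hxP)).1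
      | cons b1 bs' =>
        simp at hEV
        obtain ⟨he1, hV⟩ := hEV
        subst he1
        have hex : e = x := by
          rcases he with h | h
          · exact h
          · have : x ∈ U := hstar U e bs' hPU x hx (by rw [h]; exact hxy)
            exact absurd rfl (hclean x this).1
        rw [hex] at hPU
        have hUclean : ∀ u ∈ U, u ≠ b ∧ u ≠ a := by
          intro u hu
          have huP : u ∈ P := hPU ▸ List.mem_append_left _ hu
          exact ⟨ne_of_lt (hPb u huP), ne_of_lt (lt_trans (hPb u huP) hba)⟩
        have hxa : x ≠ a := ne_of_lt (lt_trans hxb hba)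
        have hxbne : x ≠ b := ne_of_lt hxb
        have hlU : l = U ++ x :: (bs' ++ a :: R) := by
          rw [hl, hPU]
          simp
        have hmapG : l.map (pvSwapC b a) =
            U ++ x :: ((bs' ++ a :: R).map (pvSwapC b a)) := by
          rw [hlU, List.map_append, List.map_cons, map_clean b a U hUclean]
          simp [pvSwapC, hxbne, hxa]
        have hmapC : l.map (pvSwapC x y) =
            U ++ y :: ((bs' ++ a :: R).map (pvSwapC x y)) := by
          rw [hlU, List.map_append, List.map_cons, map_clean x y U hclean]
          simp [pvSwapC]
        rw [hmapG, hmapC]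
        exact lex_prefix U x y _ _ hxy
  · -- x unscanned: both maps keep P, and at the break position b beats the candidate
    have hbx : b ≤ x := not_lt.mp (fun h => hxP (hbmin x hx h))
    have hby : b < y := lt_of_le_of_lt hbx hxy
    have hPclean : ∀ u ∈ P, u ≠ x ∧ u ≠ y := by
      intro u hu
      have hux : u < x := lt_of_lt_of_le (hPb u hu) hbx
      exact ⟨ne_of_lt hux, ne_of_lt (lt_trans hux hxy)⟩
    have hmapC : l.map (pvSwapC x y) = P ++ (pvSwapC x y a) :: (R.map (pvSwapC x y)) := by
      rw [hl, List.map_append, List.map_cons, map_clean x y P hPclean]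
    rw [greedy_map l P a b R hl hPb hba, hmapC]
    apply lex_prefix
    by_cases hax : a = x
    · simpa [pvSwapC, hax] using hby
    · by_cases hay : a = y
      · have hbx' : b < x := lt_of_le_of_ne hbx (fun h => hne ⟨h.symm, hay.symm⟩)
        simpa [pvSwapC, hax, hay, ne_of_gt hxy] using hbx'
      · simpa [pvSwapC, hax, hay] using hba

theorem mem_pvPairs (d : List Char) (hd : d.Pairwise (· < ·)) (x y : Char) :
    (x, y) ∈ pvPairs d ↔ (x ∈ d ∧ y ∈ d ∧ x < y) := by
  induction d with
  | nil => simp [pvPairs]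
  | cons c t ih =>
    obtain ⟨hhead, htail⟩ := List.pairwise_cons.mp hd
    constructor
    · intro h
      rcases List.mem_append.mp h with h | h
      · obtain ⟨y0, hy0, heq⟩ := List.mem_map.mp h
        obtain ⟨h1, h2⟩ := Prod.mk.injEq .. ▸ heq
        subst h1; subst h2
        exact ⟨by simp, List.mem_cons_of_mem _ hy0, hhead _ hy0⟩
      · obtain ⟨h1, h2, h3⟩ := (ih htail).mp h
        exact ⟨List.mem_cons_of_mem _ h1, List.mem_cons_of_mem _ h2, h3⟩
    · rintro ⟨hx, hy, hxy⟩
      rcases List.mem_cons.mp hx with rfl | hx'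
      · rcases List.mem_cons.mp hy with rfl | hy'
        · exact absurd hxy (lt_irrefl _)
        · exact List.mem_append.mpr (Or.inl (List.mem_map.mpr ⟨y, hy', rfl⟩))
      · rcases List.mem_cons.mp hy with rfl | hy'
        · exact absurd (lt_trans (hhead x hx') hxy) (lt_irrefl _)
        · exact List.mem_append.mpr (Or.inr ((ih htail).mpr ⟨hx', hy', hxy⟩))

-- the fold in B stays in the candidate set and is a lower bound of it
theorem foldl_min_cases {α β : Type} [LinearOrder β] (f : α → β) :
    ∀ (ps : List α) (acc : β),
      (ps.foldl (fun best p => if f p < best then f p else best) acc = acc ∨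
        ∃ p ∈ ps, ps.foldl (fun best p => if f p < best then f p else best) acc = f p) ∧
      ps.foldl (fun best p => if f p < best then f p else best) acc ≤ acc ∧
      ∀ p ∈ ps, ps.foldl (fun best p => if f p < best then f p else best) acc ≤ f p := by
  intro ps
  induction ps with
  | nil => simp
  | cons p t ih =>
    intro acc
    simp only [List.foldl_cons]
    obtain ⟨hmem, hle, hall⟩ := ih (if f p < acc then f p else acc)
    have hacc : (if f p < acc then f p else acc) ≤ acc := by
      split_ifs with h
      · exact le_of_lt h
      · exact le_refl acc
    have hfp : (if f p < acc then f p else acc) ≤ f p := by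
      split_ifs with h
      · exact le_refl _
      · exact not_lt.mp h
    refine ⟨?_, le_trans hle hacc, ?_⟩
    · rcases hmem with h | ⟨q, hq, h⟩
      · rw [h]
        split_ifs with h'
        · exact Or.inr ⟨p, by simp, rfl⟩
        · exact Or.inl rfl
      · exact Or.inr ⟨q, List.mem_cons_of_mem _ hq, h⟩
    · intro q hq
      rcases List.mem_cons.mp hq with rfl | hq'
      · exact le_trans hle hfp
      · exact hall q hq'

-- the fold in B computes the unique minimum of acc and the f-images
theorem foldl_min_eq {α β : Type} [LinearOrder β] (f : α → β) (ps : List α) (acc g : β)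
    (hmem : g = acc ∨ ∃ p ∈ ps, f p = g)
    (hle : ∀ x, (x = acc ∨ ∃ p ∈ ps, f p = x) → g ≤ x) :
    ps.foldl (fun best p => if f p < best then f p else best) acc = g := by
  obtain ⟨hm, ha, hall⟩ := foldl_min_cases f ps acc
  have h1 : g ≤ ps.foldl (fun best p => if f p < best then f p else best) acc := by
    rcases hm with h | ⟨p, hp, h⟩
    · rw [h]
      exact hle acc (Or.inl rfl)
    · rw [h]
      exact hle (f p) (Or.inr ⟨p, hp, rfl⟩)
  have h2 : ps.foldl (fun best p => if f p < best then f p else best) acc ≤ g := by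
    rcases hmem with rfl | ⟨p, hp, rfl⟩
    · exact ha
    · exact hall p hp
  exact le_antisymm h2 h1

set_option maxHeartbeats 1000000 in
theorem chooseAndSwap_eq_alt (A : String) : chooseAndSwap A = chooseAndSwap_alt A := by
  have hd_pair : (pvSortedDistinct A).Pairwise (· < ·) := by
    simpa [pvSortedDistinct] using PySem.List.sorted_ofList_pairwise_lt A.toList
  have hmemd : ∀ c : Char, c ∈ pvSortedDistinct A ↔ c ∈ A.toList := by
    intro c
    rw [pvSortedDistinct, PySem.List.mem_sorted, PySem.Set.mem_ofList]
  have hspec := scan_spec A.toList A.toList [] (pvSortedDistinct A) rfl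
    (fun c => by simp [hmemd c]) hd_pair (prefStar_nil A.toList)
  have hA : A = String.ofList A.toList := String.ofList_toList.symm
  have halt : chooseAndSwap_alt A = (pvPairs (pvSortedDistinct A)).foldl
      (fun best p => if String.ofList (A.toList.map (pvSwapC p.1 p.2)) < best
        then String.ofList (A.toList.map (pvSwapC p.1 p.2)) else best) A := rfl
  cases hscan : pvScan A.toList (pvSortedDistinct A) with
  | none =>
    rw [halt, show chooseAndSwap A = A by unfold chooseAndSwap; rw [hscan]]
    have hstar : PrefStar A.toList A.toList := hspec.1 hscan
    refine Eq.symm (foldl_min_eq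
      (fun p : Char × Char => String.ofList (A.toList.map (pvSwapC p.1 p.2))) _ A A (Or.inl rfl) ?_)
    intro xx hxx
    rcases hxx with h | ⟨p, hp, h⟩
    · rw [h]
    · rw [← h]
      obtain ⟨x0, y0⟩ := p
      obtain ⟨hx, hy, hxy⟩ := (mem_pvPairs _ hd_pair x0 y0).mp hp
      have hlt := cand_gt_none A.toList hstar x0 y0 ((hmemd x0).mp hx) hxy
      calc A = String.ofList A.toList := hA
        _ ≤ _ := le_of_lt (ofList_lt_ofList hlt)
  | some ab =>
    obtain ⟨a, b⟩ := ab
    obtain ⟨P, R, hl, hbl, hba, hPb, hbmin, hstarP⟩ := hspec.2 a b hscan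
    have hal : a ∈ A.toList := hl ▸ List.mem_append_right _ (List.mem_cons_self ..)
    have hswap : A.toList.map (pvSwapC a b) = A.toList.map (pvSwapC b a) :=
      List.map_congr_left (fun c _ => swapC_comm a b c)
    rw [halt, show chooseAndSwap A = String.ofList (A.toList.map (pvSwapC a b))
      by unfold chooseAndSwap; rw [hscan], hswap]
    refine Eq.symm (foldl_min_eq
      (fun p : Char × Char => String.ofList (A.toList.map (pvSwapC p.1 p.2))) _ A
      (String.ofList (A.toList.map (pvSwapC b a)))
      (Or.inr ⟨(b, a), (mem_pvPairs _ hd_pair b a).mpr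
        ⟨(hmemd b).mpr hbl, (hmemd a).mpr hal, hba⟩, rfl⟩) ?_)
    intro xx hxx
    rcases hxx with h | ⟨p, hp, h⟩
    · rw [h]
      exact le_of_lt (lt_of_lt_of_eq
        (ofList_lt_ofList (cand_lt_orig A.toList P a b R hl hPb hba)) hA.symm)
    · rw [← h]
      obtain ⟨x0, y0⟩ := p
      obtain ⟨hx, hy, hxy⟩ := (mem_pvPairs _ hd_pair x0 y0).mp hp
      by_cases hp_eq : x0 = b ∧ y0 = a
      · obtain ⟨rfl, rfl⟩ := hp_eq
        exact le_refl _
      · exact le_of_lt (ofList_lt_ofList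
          (cand_lt_cand A.toList P a b R hl hPb hbmin hstarP hba x0 y0
            ((hmemd x0).mp hx) ((hmemd y0).mp hy) hxy hp_eq))

-- ===== VERDICT (by name: the statement is the Claim_ definition above) =====
theorem chooseAndSwap_spec : Claim_equal_chooseAndSwap := by
  intro A _
  unfold Spec_chooseAndSwap
  exact chooseAndSwap_eq_alt A
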